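-- pv_equiv track=rewrite | github.com/MajoDurco/PV248 | 07/music.py | group_peaks
-- ===== SOURCE A (Python) =====
-- def group_peaks(peaks):
--     if not peaks:
--         return []
--
--     clustered_peaks = []
--
--     cluster = []
--     prev_frequency = None
--     for frequency, magnitude in sorted(peaks):
--         if not prev_frequency:
--             prev_frequency = frequency
--
--         if (frequency - prev_frequency) > 1:
--             clustered_peaks.append(max(cluster, key=lambda x: x[1]))
--             cluster = []
--
--         cluster.append((frequency, magnitude))
--         prev_frequency = frequency
--     clustered_peaks.append(max(cluster, key=lambda x: x[1]))
--
--     return clustered_peaks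
-- ===== SOURCE B (Python) =====
-- def group_peaks(peaks):
--     # Aggregate magnitudes per frequency in one dict pass, then walk the
--     # sorted distinct frequencies once, keeping the best peak of the open
--     # cluster and emitting it whenever a gap larger than 1 appears.
--     best = {}
--     for f, m in peaks:
--         best[f] = max(best.get(f, m), m)
--     out = []
--     cur = None  # (best peak of the open cluster, last frequency seen)
--     for f in sorted(best):
--         m = best[f]
--         if cur is None:
--             cur = ((f, m), f)
--         elif f - cur[1] > 1:
--             out.append(cur[0])
--             cur = ((f, m), f)
--         elif m > cur[0][1]:
--             cur = ((f, m), f)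
--         else:
--             cur = (cur[0], f)
--     if cur is not None:
--         out.append(cur[0])
--     return out
-- ===== Notes on version B (the rewrite author's own statement) =====
-- stated objective: alternative
-- what changed: A sorts all peaks and scans them once, growing an explicit cluster list and flushing max(cluster, key=mag) at each gap; B instead aggregates the maximal magnitude per frequency in one dict pass, then walks the sorted distinct frequencies once with a running best peak per open cluster, and drops A's falsy-reset of prev_frequency at frequency 0 (declared as the intended difference).
-- intended difference: On inputs containing a frequency-0 peak together with some frequency >= 2 and no frequency 1, A's 'if not prev_frequency' treats the previous frequency 0 as unset and merges the cluster ending at 0 with the next cluster (returning one combined maximum), while B splits at the gap and returns both cluster maxima, which is the intended gap-based clustering. — e.g. on group_peaks([(0, 0), (5, 1)]): A returns [(5, 1)], B returns [(0, 0), (5, 1)]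
import Mathlib
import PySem

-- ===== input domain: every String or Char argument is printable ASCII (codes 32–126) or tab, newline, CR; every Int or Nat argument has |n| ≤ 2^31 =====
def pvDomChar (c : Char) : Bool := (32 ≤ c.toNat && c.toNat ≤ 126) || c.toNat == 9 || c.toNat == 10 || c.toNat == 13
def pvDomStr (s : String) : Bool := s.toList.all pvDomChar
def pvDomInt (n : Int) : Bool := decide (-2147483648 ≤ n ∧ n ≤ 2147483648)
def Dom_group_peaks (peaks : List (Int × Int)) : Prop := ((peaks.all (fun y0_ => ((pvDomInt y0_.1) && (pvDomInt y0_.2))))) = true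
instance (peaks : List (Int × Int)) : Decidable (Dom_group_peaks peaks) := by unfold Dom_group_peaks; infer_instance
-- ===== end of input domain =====

-- B aggregates the maximal magnitude per frequency in a dict and walks the sorted distinct
-- frequencies once with a running best (objective: alternative); it drops A's falsy-reset of
-- prev_frequency at frequency 0, stated as the intended difference D_ below.

-- ===== PORT A =====
-- max(cluster, key=lambda x: x[1]) as zero-or-one element (never applied to [] by A)
def pvMM (c : List (Int × Int)) : List (Int × Int) :=
  (PySem.List.max? c (fun x => x.2)).toList

-- one iteration of A's loop; state = (clustered_peaks, cluster, prev_frequency)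
def pvStepA (s : List (Int × Int) × List (Int × Int) × Option Int) (p : Int × Int) :
    List (Int × Int) × List (Int × Int) × Option Int :=
  -- if not prev_frequency: prev_frequency = frequency   ('not' is falsy: None or 0)
  let prev1 : Int :=
    match s.2.2 with
    | none => p.1
    | some q => if q = 0 then p.1 else q
  if p.1 - prev1 > 1 then (s.1 ++ pvMM s.2.1, [p], some p.1)
  else (s.1, s.2.1 ++ [p], some p.1)

def group_peaks (peaks : List (Int × Int)) : List (Int × Int) :=
  if peaks = [] then []
  else
    let s := (PySem.List.sorted2 peaks (fun x => x.1) (fun x => x.2)).foldl pvStepA ([], [], none)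
    s.1 ++ pvMM s.2.1

-- ===== PORT B =====
-- best[f] = max(best.get(f, m), m)
def pvUpd (d : PySem.Dict Int Int) (p : Int × Int) : PySem.Dict Int Int :=
  d.insert p.1 (max ((d.get? p.1).getD p.2) p.2)

-- one iteration of B's walk; state = (out, cur) with cur = (best peak of open cluster, last freq)
def pvStepB (s : List (Int × Int) × Option ((Int × Int) × Int)) (p : Int × Int) :
    List (Int × Int) × Option ((Int × Int) × Int) :=
  match s.2 with
  | none => (s.1, some (p, p.1))
  | some (b, lf) =>
    if p.1 - lf > 1 then (s.1 ++ [b], some (p, p.1))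
    else if p.2 > b.2 then (s.1, some (p, p.1))
    else (s.1, some (b, p.1))

def group_peaks_alt (peaks : List (Int × Int)) : List (Int × Int) :=
  let best := peaks.foldl pvUpd PySem.Dict.empty
  -- for f in sorted(best): m = best[f] — f is always a key of best, so best[f] returns; getD is its total form
  let s := (PySem.List.sorted best.keys (fun k => k)).foldl
      (fun s f => pvStepB s (f, best.getD f 0)) ([], none)
  match s.2 with
  | none => s.1
  | some (b, _) => s.1 ++ [b]

-- ===== PRECONDITION & SPEC =====
-- On inputs holding a frequency-0 peak together with some frequency ≥ 2 and no frequency 1,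
-- A's 'if not prev_frequency' treats the previous frequency 0 as unset and merges the cluster
-- ending at frequency 0 with the following cluster (returning one combined maximum), while B
-- splits at the gap and returns both cluster maxima — the intended gap-based clustering.
def D_group_peaks (peaks : List (Int × Int)) : Prop :=
  (∃ p ∈ peaks, p.1 = 0) ∧ (∃ p ∈ peaks, 2 ≤ p.1) ∧ (∀ p ∈ peaks, p.1 ≠ 1)
instance (peaks : List (Int × Int)) : Decidable (D_group_peaks peaks) := by
  unfold D_group_peaks; infer_instance

def Spec_group_peaks (peaks : List (Int × Int)) (out : List (Int × Int)) : Prop :=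
  ¬ D_group_peaks peaks → out = group_peaks_alt peaks
instance (peaks : List (Int × Int)) (out : List (Int × Int)) : Decidable (Spec_group_peaks peaks out) := by
  unfold Spec_group_peaks; infer_instance

def pvDiffWitness_group_peaks : (List (Int × Int)) := [(0, 0), (5, 1)]
def pvDiffWitnessOut_group_peaks : (List (Int × Int)) × (List (Int × Int)) :=
  ([(5, 1)], [(0, 0), (5, 1)])

-- ===== CLAIM (what is proved, stated in full; the proofs are below) =====
def Claim_unchanged_group_peaks : Prop :=
  ∀ (peaks : List (Int × Int)), Dom_group_peaks peaks → Spec_group_peaks peaks (group_peaks peaks)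
def Claim_changed_group_peaks : Prop :=
  Dom_group_peaks (pvDiffWitness_group_peaks) ∧ D_group_peaks (pvDiffWitness_group_peaks) ∧
  group_peaks (pvDiffWitness_group_peaks) = pvDiffWitnessOut_group_peaks.1 ∧
  group_peaks_alt (pvDiffWitness_group_peaks) = pvDiffWitnessOut_group_peaks.2 ∧
  pvDiffWitnessOut_group_peaks.1 ≠ pvDiffWitnessOut_group_peaks.2

-- ===== LEMMAS AND PROOFS =====

def pvLE (p q : Int × Int) : Prop := p.1 < q.1 ∨ (p.1 = q.1 ∧ p.2 ≤ q.2)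

def pvBefore (p q : Int × Int) : Bool :=
  decide (p.1 < q.1) || (!decide (q.1 < p.1) && decide (p.2 < q.2))

def pvAggL : List (Int × Int) → List (Int × Int)
  | [] => []
  | [p] => [p]
  | p :: q :: t => if p.1 = q.1 then pvAggL (q :: t) else p :: pvAggL (q :: t)

def pvFinA (s : List (Int × Int) × List (Int × Int) × Option Int) : List (Int × Int) :=
  s.1 ++ pvMM s.2.1

def pvFA (l : List (Int × Int)) (s : List (Int × Int) × List (Int × Int) × Option Int) :
    List (Int × Int) := pvFinA (l.foldl pvStepA s)

def pvFinB (s : List (Int × Int) × Option ((Int × Int) × Int)) : List (Int × Int) :=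
  match s.2 with
  | none => s.1
  | some (b, _) => s.1 ++ [b]

def pvFB (l : List (Int × Int)) (s : List (Int × Int) × Option ((Int × Int) × Int)) :
    List (Int × Int) := pvFinB (l.foldl pvStepB s)

def pvMags (l : List (Int × Int)) (f : Int) : List Int :=
  (l.filter (fun p => p.1 == f)).map (fun p => p.2)

def pvOMax (o : Option Int) (m : Int) : Option Int := some (max (o.getD m) m)

def pvMaxStep (acc : Option (Int × Int)) (x : Int × Int) : Option (Int × Int) :=
  match acc with
  | none => some x
  | some m => if m.2 < x.2 then some x else some m

def pvMagsUB (l : List (Int × Int)) (p : Int × Int) : Prop :=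
  p.2 ∈ pvMags l p.1 ∧ ∀ x ∈ pvMags l p.1, x ≤ p.2

lemma pvMax?_eq (c : List (Int × Int)) :
    PySem.List.max? c (fun x => x.2) = c.foldl pvMaxStep none := by
  simp only [PySem.List.max?]
  apply PySem.List.foldl_congr_mem
  intro acc x hx
  cases acc <;> rfl

lemma pvMaxApp (c : List (Int × Int)) (p : Int × Int) :
    PySem.List.max? (c ++ [p]) (fun x => x.2) =
      some ((PySem.List.max? c (fun x => x.2)).elim p (fun b => if b.2 < p.2 then p else b)) := by
  rw [pvMax?_eq, pvMax?_eq, List.foldl_append, List.foldl_cons, List.foldl_nil]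
  cases c.foldl pvMaxStep none with
  | none => rfl
  | some b => by_cases hb : b.2 < p.2 <;> simp [pvMaxStep, hb]

lemma pvMaxApp_some {cur : List (Int × Int)} {b : Int × Int} (p : Int × Int)
    (h : PySem.List.max? cur (fun x => x.2) = some b) :
    PySem.List.max? (cur ++ [p]) (fun x => x.2) = some (if b.2 < p.2 then p else b) := by
  rw [pvMaxApp, h]; rfl

lemma pvOMax_some : ∀ (t : List Int) (a : Int),
    t.foldl pvOMax (some a) = some (t.foldl max a) := by
  intro t
  induction t with
  | nil => intro a; rfl
  | cons m t ih => intro a; simp only [List.foldl_cons, pvOMax, Option.getD_some]; exact ih _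

lemma pvGetBuild : ∀ (l : List (Int × Int)) (d : PySem.Dict Int Int) (f : Int),
    (l.foldl pvUpd d).get? f = (pvMags l f).foldl pvOMax (d.get? f) := by
  intro l
  induction l with
  | nil => intro d f; rfl
  | cons p t ih =>
    intro d f
    simp only [List.foldl_cons, pvMags, List.filter_cons]
    by_cases hpf : p.1 = f
    · simp only [hpf, beq_self_eq_true, if_pos, List.map_cons, List.foldl_cons]
      rw [ih]
      have : (pvUpd d p).get? f = pvOMax (d.get? f) p.2 := by
        simp [pvUpd, hpf, pvOMax]
      rw [this]
      rfl
    · have hb : (p.1 == f) = false := by simp [hpf]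
      simp only [hb, Bool.false_eq_true]
      rw [ih]
      have : (pvUpd d p).get? f = d.get? f := by
        simp [pvUpd, PySem.Dict.get?_insert, Ne.symm hpf]
      rw [this]
      rfl

lemma pvMM_congr {cur cur' : List (Int × Int)}
    (h : PySem.List.max? cur (fun x => x.2) = PySem.List.max? cur' (fun x => x.2)) :
    pvMM cur = pvMM cur' := by
  unfold pvMM; rw [h]

lemma pvBisim (l : List (Int × Int)) : ∀ (OUT cur cur' : List (Int × Int)) (prev : Option Int),
    PySem.List.max? cur (fun x => x.2) = PySem.List.max? cur' (fun x => x.2) →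
    pvFA l (OUT, cur, prev) = pvFA l (OUT, cur', prev) := by
  induction l with
  | nil =>
    intro OUT cur cur' prev h
    show pvFinA _ = pvFinA _
    simp only [List.foldl_nil, pvFinA]
    rw [pvMM_congr h]
  | cons p t ih =>
    intro OUT cur cur' prev h
    show pvFA t (pvStepA (OUT, cur, prev) p) = pvFA t (pvStepA (OUT, cur', prev) p)
    cases prev with
    | none =>
      simp only [pvStepA]
      have hno : ¬ (p.1 - p.1 > 1) := by omega
      rw [if_neg hno, if_neg hno]
      apply ih
      rw [pvMaxApp, pvMaxApp, h]
    | some q =>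
      simp only [pvStepA]
      by_cases hq : q = 0
      · simp only [hq, if_true]
        have hno : ¬ (p.1 - p.1 > 1) := by omega
        rw [if_neg hno, if_neg hno]
        apply ih
        rw [pvMaxApp, pvMaxApp, h]
      · simp only [if_neg hq]
        split
        · rw [pvMM_congr h]
        · apply ih
          rw [pvMaxApp, pvMaxApp, h]

lemma pvLE_trans {a b c : Int × Int} (h1 : pvLE a b) (h2 : pvLE b c) : pvLE a c := by
  unfold pvLE at *; omega

lemma pvBefore_true {a b : Int × Int} (h : pvBefore a b = true) : pvLE a b := by
  unfold pvBefore at h; unfold pvLE; simp at h; omega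

lemma pvBefore_false {a b : Int × Int} (h : pvBefore a b = false) : pvLE b a := by
  unfold pvBefore at h; unfold pvLE; simp at h; omega

lemma pvInsertBy_pairwise (x : Int × Int) :
    ∀ (l : List (Int × Int)), l.Pairwise pvLE →
    (PySem.List.insertBy pvBefore x l).Pairwise pvLE := by
  intro l
  induction l with
  | nil => intro _; simp [PySem.List.insertBy]
  | cons y ys ih =>
    intro h
    rw [List.pairwise_cons] at h
    obtain ⟨hy, hys⟩ := h
    by_cases hb : pvBefore x y = true
    · rw [show PySem.List.insertBy pvBefore x (y :: ys) = x :: y :: ys by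
        simp [PySem.List.insertBy, hb]]
      rw [List.pairwise_cons]
      constructor
      · intro z hz
        rcases List.mem_cons.mp hz with rfl | hz
        · exact pvBefore_true hb
        · exact pvLE_trans (pvBefore_true hb) (hy z hz)
      · rw [List.pairwise_cons]; exact ⟨hy, hys⟩
    · rw [show PySem.List.insertBy pvBefore x (y :: ys) = y :: PySem.List.insertBy pvBefore x ys by
        simp [PySem.List.insertBy, hb]]
      rw [List.pairwise_cons]
      refine ⟨?_, ih hys⟩
      intro z hz
      rcases (PySem.List.mem_insertBy pvBefore x z ys).mp hz with rfl | hz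
      · exact pvBefore_false (by simpa using hb)
      · exact hy z hz

lemma pvSorted2_pairwise (xs : List (Int × Int)) :
    (PySem.List.sorted2 xs (fun x => x.1) (fun x => x.2)).Pairwise pvLE := by
  have aux : ∀ (ys : List (Int × Int)) (acc : List (Int × Int)), acc.Pairwise pvLE →
      (ys.foldl (fun acc x => PySem.List.insertBy pvBefore x acc) acc).Pairwise pvLE := by
    intro ys
    induction ys with
    | nil => intro acc h; exact h
    | cons y t ih => intro acc h; exact ih _ (pvInsertBy_pairwise y acc h)
  exact aux xs [] (by simp)

lemma pvAggL_subset : ∀ (l : List (Int × Int)), ∀ x ∈ pvAggL l, x ∈ l := by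
  intro l
  induction l using pvAggL.induct with
  | case1 => simp [pvAggL]
  | case2 p => simp [pvAggL]
  | case3 p q t hpq ih =>
    intro x hx
    rw [show pvAggL (p::q::t) = pvAggL (q::t) by simp [pvAggL, hpq]] at hx
    exact List.mem_cons_of_mem p (ih x hx)
  | case4 p q t hpq ih =>
    intro x hx
    rw [show pvAggL (p::q::t) = p :: pvAggL (q::t) by simp [pvAggL, hpq]] at hx
    rcases List.mem_cons.mp hx with rfl | hx
    · exact List.mem_cons_self
    · exact List.mem_cons_of_mem p (ih x hx)

lemma pvAggL_freq : ∀ (l : List (Int × Int)) (f : Int),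
    (∃ p ∈ l, p.1 = f) → (∃ p ∈ pvAggL l, p.1 = f) := by
  intro l
  induction l using pvAggL.induct with
  | case1 => simp
  | case2 p => simp [pvAggL]
  | case3 p q t hpq ih =>
    intro f ⟨x, hx, hxf⟩
    rw [show pvAggL (p::q::t) = pvAggL (q::t) by simp [pvAggL, hpq]]
    rcases List.mem_cons.mp hx with rfl | hx
    · exact ih f ⟨q, List.mem_cons_self, by omega⟩
    · exact ih f ⟨x, hx, hxf⟩
  | case4 p q t hpq ih =>
    intro f ⟨x, hx, hxf⟩
    rw [show pvAggL (p::q::t) = p :: pvAggL (q::t) by simp [pvAggL, hpq]]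
    rcases List.mem_cons.mp hx with rfl | hx
    · exact ⟨x, List.mem_cons_self, hxf⟩
    · obtain ⟨y, hy, hyf⟩ := ih f ⟨x, hx, hxf⟩
      exact ⟨y, List.mem_cons_of_mem p hy, hyf⟩

lemma pvAggL_ne_nil : ∀ (l : List (Int × Int)), l ≠ [] → pvAggL l ≠ [] := by
  intro l
  induction l using pvAggL.induct with
  | case1 => simp
  | case2 p => simp [pvAggL]
  | case3 p q t hpq ih =>
    intro _
    rw [show pvAggL (p::q::t) = pvAggL (q::t) by simp [pvAggL, hpq]]
    exact ih (by simp)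
  | case4 p q t hpq ih =>
    intro _
    rw [show pvAggL (p::q::t) = p :: pvAggL (q::t) by simp [pvAggL, hpq]]
    simp

lemma pvAggL_pairwise : ∀ (l : List (Int × Int)), l.Pairwise pvLE →
    (pvAggL l).Pairwise (fun p q => p.1 < q.1) := by
  intro l
  induction l using pvAggL.induct with
  | case1 => simp [pvAggL]
  | case2 p => simp [pvAggL]
  | case3 p q t hpq ih =>
    intro h
    rw [show pvAggL (p::q::t) = pvAggL (q::t) by simp [pvAggL, hpq]]
    exact ih (List.pairwise_cons.mp h).2
  | case4 p q t hpq ih =>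
    intro h
    rw [List.pairwise_cons] at h
    obtain ⟨hp, ht⟩ := h
    rw [show pvAggL (p::q::t) = p :: pvAggL (q::t) by simp [pvAggL, hpq]]
    rw [List.pairwise_cons]
    refine ⟨?_, ih ht⟩
    intro x hx
    have hxm : x ∈ q :: t := pvAggL_subset _ x hx
    have hpq' : p.1 < q.1 := by
      have := hp q List.mem_cons_self; unfold pvLE at this; omega
    rcases List.mem_cons.mp hxm with rfl | hxt
    · exact hpq'
    · have := (List.pairwise_cons.mp ht).1 x hxt
      unfold pvLE at this; omega

lemma pvMags_cons_self (p : Int × Int) (t : List (Int × Int)) :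
    pvMags (p :: t) p.1 = p.2 :: pvMags t p.1 := by
  simp [pvMags]

lemma pvMags_cons_ne (p : Int × Int) (t : List (Int × Int)) (f : Int) (h : p.1 ≠ f) :
    pvMags (p :: t) f = pvMags t f := by
  simp [pvMags, h]

lemma pvAggL_val : ∀ (l : List (Int × Int)), l.Pairwise pvLE →
    ∀ p ∈ pvAggL l, pvMagsUB l p := by
  intro l
  induction l using pvAggL.induct with
  | case1 => simp [pvAggL]
  | case2 p =>
    intro _ x hx
    rw [show pvAggL [p] = [p] from rfl] at hx
    rcases List.mem_singleton.mp hx with rfl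
    constructor
    · rw [pvMags_cons_self]; exact List.mem_cons_self
    · intro m hm
      rw [pvMags_cons_self] at hm
      rcases List.mem_cons.mp hm with rfl | hm
      · omega
      · simp [pvMags] at hm
  | case3 p q t hpq ih =>
    intro h x hx
    rw [List.pairwise_cons] at h
    obtain ⟨hp, ht⟩ := h
    rw [show pvAggL (p::q::t) = pvAggL (q::t) by simp [pvAggL, hpq]] at hx
    have hub := ih ht x hx
    obtain ⟨hmem, hub'⟩ := hub
    by_cases hxf : p.1 = x.1
    · constructor
      · rw [← hxf, pvMags_cons_self, hxf]; exact List.mem_cons_of_mem _ hmem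
      · intro m hm
        rw [← hxf, pvMags_cons_self, hxf] at hm
        rcases List.mem_cons.mp hm with rfl | hm
        · -- m = p.2 ≤ q.2 ≤ x.2 : q.2 ∈ pvMags (q::t) x.1 since q.1 = p.1 = x.1
          have hq2 : q.2 ∈ pvMags (q :: t) x.1 := by
            rw [show x.1 = q.1 by omega, pvMags_cons_self]; exact List.mem_cons_self
          have h1 : q.2 ≤ x.2 := hub' _ hq2
          have h2 : p.2 ≤ q.2 := by
            have := hp q List.mem_cons_self; unfold pvLE at this; omega
          omega
        · exact hub' m hm
    · constructor
      · rwa [pvMags_cons_ne p (q::t) x.1 (by omega)]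
      · intro m hm
        rw [pvMags_cons_ne p (q::t) x.1 (by omega)] at hm
        exact hub' m hm
  | case4 p q t hpq ih =>
    intro h x hx
    rw [List.pairwise_cons] at h
    obtain ⟨hp, ht⟩ := h
    have hplt : ∀ r ∈ q :: t, p.1 < r.1 := by
      intro r hr
      have hq1 : p.1 < q.1 := by have := hp q List.mem_cons_self; unfold pvLE at this; omega
      rcases List.mem_cons.mp hr with rfl | hrt
      · exact hq1
      · have := (List.pairwise_cons.mp ht).1 r hrt; unfold pvLE at this; omega
    rw [show pvAggL (p::q::t) = p :: pvAggL (q::t) by simp [pvAggL, hpq]] at hx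
    rcases List.mem_cons.mp hx with rfl | hx
    · have hmags : pvMags (q :: t) x.1 = [] := by
        simp only [pvMags, List.map_eq_nil_iff, List.filter_eq_nil_iff]
        intro r hr
        have := hplt r hr
        simp; omega
      constructor
      · rw [pvMags_cons_self, hmags]; exact List.mem_cons_self
      · intro m hm
        rw [pvMags_cons_self, hmags] at hm
        rcases List.mem_cons.mp hm with rfl | hm
        · omega
        · simp at hm
    · have hxq : x ∈ q :: t := pvAggL_subset _ x hx
      have hxf : p.1 ≠ x.1 := by have := hplt x hxq; omega
      have hub := ih ht x hx
      obtain ⟨hmem, hub'⟩ := hub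
      constructor
      · rwa [pvMags_cons_ne p (q::t) x.1 hxf]
      · intro m hm
        rw [pvMags_cons_ne p (q::t) x.1 hxf] at hm
        exact hub' m hm

lemma pvStep2 (s : List (Int × Int) × List (Int × Int) × Option Int) (p q : Int × Int)
    (hf : p.1 = q.1) (hm : p.2 ≤ q.2) (t : List (Int × Int)) :
    pvFA t (pvStepA (pvStepA s p) q) = pvFA t (pvStepA s q) := by
  obtain ⟨OUT, cur, prev⟩ := s
  obtain ⟨f, m⟩ := p
  obtain ⟨f2, k⟩ := q
  simp only at hf hm
  subst hf
  have hmax2 : PySem.List.max? [(f,m),(f,k)] (fun x => x.2) =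
      PySem.List.max? [(f,k)] (fun x => x.2) := by
    by_cases hmk : m < k
    · simp [pvMax?_eq, pvMaxStep, hmk]
    · have : m = k := by omega
      subst this; simp [pvMax?_eq, pvMaxStep]
  have hmaxapp : ∀ c : List (Int × Int),
      PySem.List.max? ((c ++ [(f,m)]) ++ [(f,k)]) (fun x => x.2) =
      PySem.List.max? (c ++ [(f,k)]) (fun x => x.2) := by
    intro c
    rw [pvMaxApp, pvMaxApp, pvMaxApp]
    cases hc : PySem.List.max? c (fun x => x.2) with
    | none =>
      simp only [Option.elim]
      by_cases hmk : m < k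
      · simp [hmk]
      · have : m = k := by omega
        subst this; simp
    | some b =>
      simp only [Option.elim]
      by_cases hbm : b.2 < m
      · rw [if_pos hbm]
        by_cases hmk : m < k
        · rw [if_pos (show (f,m).2 < k from hmk), if_pos (show b.2 < k by omega)]
        · have : m = k := by omega
          subst this
          rw [if_neg (show ¬ (f,m).2 < m from by omega), if_pos hbm]
      · rw [if_neg hbm]
  -- second step on q never splits (gap 0), first steps share the split decision
  have hpr : (if f = 0 then f else f) = f := by split <;> rfl
  by_cases hsplit : f - (match prev with | none => f | some r => if r = 0 then f else r) > 1
  · -- both first steps split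
    have e1 : pvStepA (OUT, cur, prev) (f, m) = (OUT ++ pvMM cur, [(f,m)], some f) := by
      simp only [pvStepA]; rw [if_pos hsplit]
    have e2 : pvStepA (OUT, cur, prev) (f, k) = (OUT ++ pvMM cur, [(f,k)], some f) := by
      simp only [pvStepA]; rw [if_pos hsplit]
    rw [e1, e2]
    have e3 : pvStepA (OUT ++ pvMM cur, [(f,m)], some f) (f, k) =
        (OUT ++ pvMM cur, [(f,m),(f,k)], some f) := by
      simp only [pvStepA, hpr]
      rw [if_neg (by omega)]
      rfl
    rw [e3]
    exact pvBisim t _ _ _ _ hmax2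
  · have e1 : pvStepA (OUT, cur, prev) (f, m) = (OUT, cur ++ [(f,m)], some f) := by
      simp only [pvStepA]; rw [if_neg hsplit]
    have e2 : pvStepA (OUT, cur, prev) (f, k) = (OUT, cur ++ [(f,k)], some f) := by
      simp only [pvStepA]; rw [if_neg hsplit]
    rw [e1, e2]
    have e3 : pvStepA (OUT, cur ++ [(f,m)], some f) (f, k) =
        (OUT, (cur ++ [(f,m)]) ++ [(f,k)], some f) := by
      simp only [pvStepA, hpr]
      rw [if_neg (by omega)]
    rw [e3]
    exact pvBisim t _ _ _ _ (hmaxapp cur)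

lemma pvAggA : ∀ (l : List (Int × Int)), l.Pairwise pvLE →
    ∀ s, pvFA l s = pvFA (pvAggL l) s := by
  intro l
  induction l using pvAggL.induct with
  | case1 => intro _ s; rfl
  | case2 p => intro _ s; rfl
  | case3 p q t hpq ih =>
    intro h s
    rw [List.pairwise_cons] at h
    obtain ⟨hp, ht⟩ := h
    have hm : p.2 ≤ q.2 := by
      have := hp q List.mem_cons_self; unfold pvLE at this; omega
    rw [show pvAggL (p::q::t) = pvAggL (q::t) by simp [pvAggL, hpq]]
    rw [← ih ht s]
    show pvFA t (pvStepA (pvStepA s p) q) = pvFA t (pvStepA s q)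
    exact pvStep2 s p q hpq hm t
  | case4 p q t hpq ih =>
    intro h s
    rw [show pvAggL (p::q::t) = p :: pvAggL (q::t) by simp [pvAggL, hpq]]
    show pvFA (q::t) (pvStepA s p) = pvFA (pvAggL (q::t)) (pvStepA s p)
    exact ih (List.pairwise_cons.mp h).2 _

lemma pvL2 : ∀ (l : List (Int × Int)) (OUT cur : List (Int × Int)) (b : Int × Int) (lf : Int),
    PySem.List.max? cur (fun x => x.2) = some b →
    List.IsChain (fun a c => a = 0 → c ≤ 1) (lf :: l.map (fun p => p.1)) →
    pvFA l (OUT, cur, some lf) = pvFB l (OUT, some (b, lf)) := by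
  intro l
  induction l with
  | nil =>
    intro OUT cur b lf h _
    show pvFinA (OUT, cur, some lf) = pvFinB (OUT, some (b, lf))
    simp [pvFinA, pvFinB, pvMM, h]
  | cons p t ih =>
    intro OUT cur b lf h hch
    rw [List.map_cons, List.isChain_cons_cons] at hch
    obtain ⟨h1, hch⟩ := hch
    show pvFA t (pvStepA (OUT, cur, some lf) p) = pvFB t (pvStepB (OUT, some (b, lf)) p)
    by_cases hlf : lf = 0
    · have hgap : ¬ (p.1 - lf > 1) := by have := h1 hlf; omega
      have eA : pvStepA (OUT, cur, some lf) p = (OUT, cur ++ [p], some p.1) := by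
        simp only [pvStepA, hlf, if_true]
        rw [if_neg (by omega)]
      rw [eA]
      by_cases hpb : p.2 > b.2
      · have eB : pvStepB (OUT, some (b, lf)) p = (OUT, some (p, p.1)) := by
          simp only [pvStepB]
          rw [if_neg hgap, if_pos hpb]
        rw [eB]
        apply ih _ _ _ _ _ hch
        rw [pvMaxApp_some p h, if_pos (by omega)]
      · have eB : pvStepB (OUT, some (b, lf)) p = (OUT, some (b, p.1)) := by
          simp only [pvStepB]
          rw [if_neg hgap, if_neg hpb]
        rw [eB]
        apply ih _ _ _ _ _ hch
        rw [pvMaxApp_some p h, if_neg (by omega)]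
    · have eprev : (match some lf with
          | none => p.1
          | some q => if q = 0 then p.1 else q) = lf := by
        simp [hlf]
      by_cases hgap : p.1 - lf > 1
      · have eA : pvStepA (OUT, cur, some lf) p = (OUT ++ pvMM cur, [p], some p.1) := by
          simp only [pvStepA, eprev]
          rw [if_pos hgap]
        have eB : pvStepB (OUT, some (b, lf)) p = (OUT ++ [b], some (p, p.1)) := by
          simp only [pvStepB]
          rw [if_pos hgap]
        rw [eA, eB]
        have hMMcur : pvMM cur = [b] := by simp [pvMM, h]
        rw [hMMcur]
        apply ih _ _ _ _ _ hch
        rfl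
      · have eA : pvStepA (OUT, cur, some lf) p = (OUT, cur ++ [p], some p.1) := by
          simp only [pvStepA, eprev]
          rw [if_neg hgap]
        rw [eA]
        by_cases hpb : p.2 > b.2
        · have eB : pvStepB (OUT, some (b, lf)) p = (OUT, some (p, p.1)) := by
            simp only [pvStepB]
            rw [if_neg hgap, if_pos hpb]
          rw [eB]
          apply ih _ _ _ _ _ hch
          rw [pvMaxApp_some p h, if_pos (by omega)]
        · have eB : pvStepB (OUT, some (b, lf)) p = (OUT, some (b, p.1)) := by
            simp only [pvStepB]
            rw [if_neg hgap, if_neg hpb]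
          rw [eB]
          apply ih _ _ _ _ _ hch
          rw [pvMaxApp_some p h, if_neg (by omega)]

lemma pvC2 : ∀ (l : List (Int × Int)),
    l.Pairwise (fun p q => p.1 < q.1) →
    ((∃ p ∈ l, p.1 = 0) → (∃ q ∈ l, 2 ≤ q.1) → (∃ r ∈ l, r.1 = 1)) →
    List.IsChain (fun p q => p.1 = 0 → q.1 ≤ 1) l := by
  intro l
  induction l with
  | nil => intro _ _; exact List.isChain_nil
  | cons a t ih =>
    intro hpw hq
    rw [List.pairwise_cons] at hpw
    obtain ⟨ha, hpw'⟩ := hpw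
    cases t with
    | nil => exact List.isChain_singleton a
    | cons b t' =>
      rw [List.isChain_cons_cons]
      constructor
      · intro ha0
        by_contra hb
        have hb2 : 2 ≤ b.1 := by omega
        obtain ⟨r, hr, hr1⟩ := hq ⟨a, List.mem_cons_self, ha0⟩
          ⟨b, List.mem_cons_of_mem a List.mem_cons_self, hb2⟩
        rcases List.mem_cons.mp hr with rfl | hr
        · omega
        · rcases List.mem_cons.mp hr with rfl | hr
          · omega
          · have := (List.pairwise_cons.mp hpw').1 r hr
            omega
      · apply ih hpw'
        intro ⟨p, hp, hp0⟩ ⟨q', hq', hq2⟩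
        obtain ⟨r, hr, hr1⟩ := hq ⟨p, List.mem_cons_of_mem a hp, hp0⟩
          ⟨q', List.mem_cons_of_mem a hq', hq2⟩
        rcases List.mem_cons.mp hr with rfl | hr
        · exfalso
          have := ha p hp
          omega
        · exact ⟨r, hr, hr1⟩

lemma pvBestSpec (peaks : List (Int × Int)) (f : Int) (h : pvMags peaks f ≠ []) :
    ∃ v, (peaks.foldl pvUpd PySem.Dict.empty).get? f = some v ∧
      v ∈ pvMags peaks f ∧ ∀ x ∈ pvMags peaks f, x ≤ v := by
  rw [pvGetBuild, PySem.Dict.get?_empty]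
  cases hm : pvMags peaks f with
  | nil => exact absurd hm h
  | cons m t =>
    refine ⟨t.foldl max m, ?_, ?_, ?_⟩
    · rw [List.foldl_cons]
      have : pvOMax none m = some m := by simp [pvOMax]
      rw [this, pvOMax_some]
    · rcases PySem.List.foldl_max_mem t m with heq | hmem
      · rw [heq]; exact List.mem_cons_self
      · exact List.mem_cons_of_mem m hmem
    · intro x hx
      rcases List.mem_cons.mp hx with rfl | hx
      · exact (PySem.List.le_foldl_max t x).1
      · exact (PySem.List.le_foldl_max t m).2 x hx

lemma pvKeys (peaks : List (Int × Int)) :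
    (peaks.foldl pvUpd PySem.Dict.empty).keys =
      PySem.Set.ofList (peaks.map (fun p => p.1)) := by
  have e : peaks.foldl pvUpd PySem.Dict.empty =
      List.foldl (fun (d : PySem.Dict Int Int) (x : Int × Int) =>
        d.insert ((fun p : Int × Int => p.1) x)
          ((fun (d : PySem.Dict Int Int) (p : Int × Int) =>
            max ((d.get? p.1).getD p.2) p.2) d x)) PySem.Dict.empty peaks := rfl
  rw [e, PySem.Dict.keys_foldl_insert_key]
  simp [PySem.Dict.keys_empty, PySem.Set.update, PySem.Set.ofList_eq_foldl]

lemma pvKeysNodup (peaks : List (Int × Int)) :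
    (peaks.foldl pvUpd PySem.Dict.empty).keys.Nodup := by
  have e : peaks.foldl pvUpd PySem.Dict.empty =
      List.foldl (fun (d : PySem.Dict Int Int) (x : Int × Int) =>
        d.insert ((fun p : Int × Int => p.1) x)
          ((fun (d : PySem.Dict Int Int) (p : Int × Int) =>
            max ((d.get? p.1).getD p.2) p.2) d x)) PySem.Dict.empty peaks := rfl
  rw [e]
  apply PySem.Dict.nodup_keys_foldl_insert_key
  simp [PySem.Dict.keys_empty]

lemma pvSortedKeys (peaks : List (Int × Int)) :
    PySem.List.sorted (peaks.foldl pvUpd PySem.Dict.empty).keys (fun k => k) =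
      (pvAggL (PySem.List.sorted2 peaks (fun x => x.1) (fun x => x.2))).map (fun p => p.1) := by
  have hperm : (PySem.List.sorted2 peaks (fun x => x.1) (fun x => x.2)).Perm peaks :=
    PySem.List.sorted2_perm peaks _ _ false
  have hpwS := pvSorted2_pairwise peaks
  have hpwA := pvAggL_pairwise _ hpwS
  have hlt : ((pvAggL (PySem.List.sorted2 peaks (fun x => x.1) (fun x => x.2))).map
      (fun p => p.1)).Pairwise (· < ·) := by
    rw [List.pairwise_map]; exact hpwA
  have hnd1 : ((pvAggL (PySem.List.sorted2 peaks (fun x => x.1) (fun x => x.2))).map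
      (fun p => p.1)).Nodup := hlt.imp ne_of_lt
  have hnd2 := pvKeysNodup peaks
  have hmem : ∀ a : Int, a ∈ (pvAggL (PySem.List.sorted2 peaks (fun x => x.1) (fun x => x.2))).map
      (fun p => p.1) ↔ a ∈ (peaks.foldl pvUpd PySem.Dict.empty).keys := by
    intro a
    rw [pvKeys, PySem.Set.mem_ofList, List.mem_map, List.mem_map]
    constructor
    · rintro ⟨p, hp, rfl⟩
      exact ⟨p, hperm.mem_iff.mp (pvAggL_subset _ p hp), rfl⟩
    · rintro ⟨p, hp, rfl⟩
      obtain ⟨q, hq, hqf⟩ := pvAggL_freq _ p.1 ⟨p, hperm.mem_iff.mpr hp, rfl⟩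
      exact ⟨q, hq, hqf⟩
  have hperm2 : ((pvAggL (PySem.List.sorted2 peaks (fun x => x.1) (fun x => x.2))).map
      (fun p => p.1)).Perm (peaks.foldl pvUpd PySem.Dict.empty).keys :=
    (List.perm_ext_iff_of_nodup hnd1 hnd2).mpr hmem
  exact PySem.List.sorted_eq_of_perm_of_pairwise_lt _ _ _ hperm2 hlt

lemma pvAltEq (peaks : List (Int × Int)) :
    group_peaks_alt peaks =
      pvFB (pvAggL (PySem.List.sorted2 peaks (fun x => x.1) (fun x => x.2))) ([], none) := by
  rw [show group_peaks_alt peaks = pvFinB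
      ((PySem.List.sorted (peaks.foldl pvUpd PySem.Dict.empty).keys (fun k => k)).foldl
        (fun s f => pvStepB s (f, (peaks.foldl pvUpd PySem.Dict.empty).getD f 0)) ([], none))
      from rfl]
  rw [pvSortedKeys, List.foldl_map]
  unfold pvFB
  congr 1
  apply PySem.List.foldl_congr_mem
  intro acc p hp
  have hval : (peaks.foldl pvUpd PySem.Dict.empty).getD p.1 0 = p.2 := by
    have hperm : (PySem.List.sorted2 peaks (fun x => x.1) (fun x => x.2)).Perm peaks :=
      PySem.List.sorted2_perm peaks _ _ false
    have hpS := pvAggL_subset _ p hp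
    have hppk : p ∈ peaks := hperm.mem_iff.mp hpS
    have hmagsne : pvMags peaks p.1 ≠ [] := by
      have : p.2 ∈ pvMags peaks p.1 := by
        simp only [pvMags, List.mem_map]
        exact ⟨p, List.mem_filter.mpr ⟨hppk, by simp⟩, rfl⟩
      intro hnil; rw [hnil] at this; exact List.not_mem_nil this
    obtain ⟨v, hv, hvmem, hvub⟩ := pvBestSpec peaks p.1 hmagsne
    have hmagperm : (pvMags (PySem.List.sorted2 peaks (fun x => x.1) (fun x => x.2)) p.1).Perm
        (pvMags peaks p.1) := (hperm.filter _).map _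
    obtain ⟨hxmem, hxub⟩ := pvAggL_val _ (pvSorted2_pairwise peaks) p hp
    have h1 : v ≤ p.2 := hxub v (hmagperm.mem_iff.mpr hvmem)
    have h2 : p.2 ≤ v := hvub p.2 (hmagperm.mem_iff.mp hxmem)
    rw [PySem.Dict.getD_eq_get?_getD, hv]
    simp; omega
  rw [show (p.1, (peaks.foldl pvUpd PySem.Dict.empty).getD p.1 0) = p by
    rw [hval]]

lemma pvMain (peaks : List (Int × Int)) (hD : ¬ D_group_peaks peaks) :
    group_peaks peaks = group_peaks_alt peaks := by
  by_cases hnil : peaks = []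
  · subst hnil; rfl
  · unfold group_peaks
    rw [if_neg hnil]
    show pvFA (PySem.List.sorted2 peaks (fun x => x.1) (fun x => x.2)) ([], [], none) = _
    rw [pvAggA _ (pvSorted2_pairwise peaks), pvAltEq]
    have hperm : (PySem.List.sorted2 peaks (fun x => x.1) (fun x => x.2)).Perm peaks :=
      PySem.List.sorted2_perm peaks _ _ false
    have hSne : PySem.List.sorted2 peaks (fun x => x.1) (fun x => x.2) ≠ [] := by
      intro h; rw [h] at hperm; exact hnil (hperm.nil_eq).symm
    have hch : List.IsChain (fun p q : Int × Int => p.1 = 0 → q.1 ≤ 1)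
        (pvAggL (PySem.List.sorted2 peaks (fun x => x.1) (fun x => x.2))) := by
      apply pvC2 _ (pvAggL_pairwise _ (pvSorted2_pairwise peaks))
      intro ⟨p, hp, hp0⟩ ⟨q, hq, hq2⟩
      have hppk : p ∈ peaks := hperm.mem_iff.mp (pvAggL_subset _ p hp)
      have hqpk : q ∈ peaks := hperm.mem_iff.mp (pvAggL_subset _ q hq)
      unfold D_group_peaks at hD
      push_neg at hD
      obtain ⟨r, hr, hr1⟩ := hD ⟨p, hppk, hp0⟩ ⟨q, hqpk, hq2⟩
      exact pvAggL_freq _ 1 ⟨r, hperm.mem_iff.mpr hr, hr1⟩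
    cases hagg : pvAggL (PySem.List.sorted2 peaks (fun x => x.1) (fun x => x.2)) with
    | nil => exact absurd hagg (pvAggL_ne_nil _ hSne)
    | cons y R =>
      rw [hagg] at hch
      show pvFA R (pvStepA ([], [], none) y) = pvFB R (pvStepB ([], none) y)
      have eA : pvStepA ([], [], none) y = ([], [y], some y.1) := by
        simp only [pvStepA]
        rw [if_neg (by omega)]
        rfl
      have eB : pvStepB ([], none) y = ([], some (y, y.1)) := rfl
      rw [eA, eB]
      apply pvL2 R [] [y] y y.1 rfl
      exact (List.isChain_cons_map (R := fun a b : Int => a = 0 → b ≤ 1)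
        (fun p : Int × Int => p.1) (l := R) (b := y)).mpr hch

-- ===== VERDICT (by name: the statements are the Claim_ definitions above) =====
theorem group_peaks_spec : Claim_unchanged_group_peaks := by
  intro peaks _
  unfold Spec_group_peaks
  intro hD
  exact pvMain peaks hD

theorem group_peaks_changed : Claim_changed_group_peaks := by
  unfold Claim_changed_group_peaks; decide
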